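-- pv_equiv track=rewrite | github.com/alclass/cxlots | commands/show/list_ms_history.py | make_hstgrmstr_w_dzsordsor_dzsfreqdict_n_gentotal
-- ===== SOURCE A (Python) =====
-- def make_hstgrmstr_w_dzsordsor_dzsfreqdict_n_gentotal(dz_ord_sor, hstgrm_dozen_n_freq_dict, gentotal):
--   # all dzs should be in hstgrm_dozen_n_freq_dict.keys()
--   dzs_in_dict = list(hstgrm_dozen_n_freq_dict.keys())
--   total_keys_in_lst = sum(map(lambda e: 1 if e in dzs_in_dict else 0, dz_ord_sor))
--   if total_keys_in_lst != len(dz_ord_sor):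
--     # cannot build the histogram, one or more dz_keys are missing
--     return None
--   hstgrm_str = ''
--   for dz in dz_ord_sor:
--     # the check above guarantees all keys are present (not raising KeyError)
--     hstgrm_str += str(hstgrm_dozen_n_freq_dict[dz]) + ','
--   hstgrm_str += str(gentotal)
--   return hstgrm_str
-- ===== SOURCE B (Python) =====
-- def make_hstgrmstr_w_dzsordsor_dzsfreqdict_n_gentotal(dz_ord_sor, hstgrm_dozen_n_freq_dict, gentotal):
--   # single-pass EAFP: no separate membership-counting pass
--   parts = []
--   try:
--     for dz in dz_ord_sor:
--       parts.append(str(hstgrm_dozen_n_freq_dict[dz]) + ',')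
--   except KeyError:
--     return None
--   return ''.join(parts) + str(gentotal)
-- ===== Notes on version B (the rewrite author's own statement) =====
-- stated objective: faster
-- what changed: Replaced A's two passes (LBYL: count keys present, then build the string by += concatenation) with one EAFP pass that appends pieces to a list inside try/except KeyError and joins once at the end.
import Mathlib
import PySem

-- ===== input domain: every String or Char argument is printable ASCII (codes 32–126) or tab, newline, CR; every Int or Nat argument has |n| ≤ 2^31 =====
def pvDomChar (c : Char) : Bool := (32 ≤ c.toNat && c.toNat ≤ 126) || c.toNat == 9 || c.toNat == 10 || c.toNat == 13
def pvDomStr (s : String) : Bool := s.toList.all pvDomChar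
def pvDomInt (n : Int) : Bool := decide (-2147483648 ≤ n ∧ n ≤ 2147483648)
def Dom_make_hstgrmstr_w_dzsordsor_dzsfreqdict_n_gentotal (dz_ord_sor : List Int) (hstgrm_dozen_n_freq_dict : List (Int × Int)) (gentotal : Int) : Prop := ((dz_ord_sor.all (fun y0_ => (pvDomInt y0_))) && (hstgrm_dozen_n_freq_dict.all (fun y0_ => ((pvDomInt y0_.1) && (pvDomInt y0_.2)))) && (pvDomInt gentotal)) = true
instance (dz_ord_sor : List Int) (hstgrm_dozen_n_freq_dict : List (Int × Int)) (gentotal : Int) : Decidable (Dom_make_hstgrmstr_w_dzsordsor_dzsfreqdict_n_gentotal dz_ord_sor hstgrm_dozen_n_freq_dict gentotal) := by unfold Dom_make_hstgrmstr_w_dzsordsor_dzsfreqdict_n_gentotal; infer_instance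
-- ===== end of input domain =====

-- B builds the CSV pieces in one EAFP pass (stop at the first missing key) and joins once,
-- instead of A's separate membership-counting pass followed by += concatenation.

-- ===== PORT A =====
def make_hstgrmstr_w_dzsordsor_dzsfreqdict_n_gentotal (dz_ord_sor : List Int) (hstgrm_dozen_n_freq_dict : List (Int × Int)) (gentotal : Int) : Option String :=
  let d := PySem.Dict.ofList hstgrm_dozen_n_freq_dict
  let dzs_in_dict := d.keys
  let total_keys_in_lst := (dz_ord_sor.map (fun e => if e ∈ dzs_in_dict then (1 : Int) else 0)).sum
  if total_keys_in_lst ≠ (dz_ord_sor.length : Int) then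
    none
  else
    -- d[dz]: the branch above guarantees every key is present, so getD with a dummy default is exact
    let hstgrm_str := dz_ord_sor.foldl (fun s dz => s ++ PySem.Int.toStr (d.getD dz 0) ++ ",") ""
    some (hstgrm_str ++ PySem.Int.toStr gentotal)

-- ===== PORT B =====
-- the try/except-KeyError loop of Source B: collect the pieces, none at the first missing key
def pvAltLoop (d : PySem.Dict Int Int) : List Int → Option (List String)
  | [] => some []
  | dz :: rest =>
    match d.get? dz with
    | none => none
    | some v => (pvAltLoop d rest).map (fun tl => (PySem.Int.toStr v ++ ",") :: tl)

def make_hstgrmstr_w_dzsordsor_dzsfreqdict_n_gentotal_alt (dz_ord_sor : List Int) (hstgrm_dozen_n_freq_dict : List (Int × Int)) (gentotal : Int) : Option String :=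
  let d := PySem.Dict.ofList hstgrm_dozen_n_freq_dict
  match pvAltLoop d dz_ord_sor with
  | none => none
  | some parts => some (PySem.Str.join "" parts ++ PySem.Int.toStr gentotal)

-- ===== PRECONDITION & SPEC =====
def Spec_make_hstgrmstr_w_dzsordsor_dzsfreqdict_n_gentotal (dz_ord_sor : List Int) (hstgrm_dozen_n_freq_dict : List (Int × Int)) (gentotal : Int) (out : Option String) : Prop := out = make_hstgrmstr_w_dzsordsor_dzsfreqdict_n_gentotal_alt dz_ord_sor hstgrm_dozen_n_freq_dict gentotal
instance (dz_ord_sor : List Int) (hstgrm_dozen_n_freq_dict : List (Int × Int)) (gentotal : Int) (out : Option String) : Decidable (Spec_make_hstgrmstr_w_dzsordsor_dzsfreqdict_n_gentotal dz_ord_sor hstgrm_dozen_n_freq_dict gentotal out) := by unfold Spec_make_hstgrmstr_w_dzsordsor_dzsfreqdict_n_gentotal; infer_instance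

-- ===== CLAIM (what is proved, stated in full; the proofs are below) =====
def Claim_equal_make_hstgrmstr_w_dzsordsor_dzsfreqdict_n_gentotal : Prop := ∀ (dz_ord_sor : List Int) (hstgrm_dozen_n_freq_dict : List (Int × Int)) (gentotal : Int), Dom_make_hstgrmstr_w_dzsordsor_dzsfreqdict_n_gentotal dz_ord_sor hstgrm_dozen_n_freq_dict gentotal → Spec_make_hstgrmstr_w_dzsordsor_dzsfreqdict_n_gentotal dz_ord_sor hstgrm_dozen_n_freq_dict gentotal (make_hstgrmstr_w_dzsordsor_dzsfreqdict_n_gentotal dz_ord_sor hstgrm_dozen_n_freq_dict gentotal)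

-- ===== LEMMAS AND PROOFS =====

theorem pv_icons (x : List Char) (tl : List (List Char)) :
    ([] : List Char).intercalate (x :: tl) = x ++ [].intercalate tl := by
  cases tl <;> simp [List.intercalate, List.intersperse]

theorem pv_join_cons (x : String) (tl : List String) :
    PySem.Str.join "" (x :: tl) = x ++ PySem.Str.join "" tl := by
  simp only [PySem.Str.join, PySem.Chars.join, List.map_cons]
  rw [show ("" : String).toList = [] from rfl, pv_icons, String.ofList_append]
  congr 1
  exact String.ofList_toList

theorem pvAltLoop_some (d : PySem.Dict Int Int) (l : List Int) (h : ∀ e ∈ l, e ∈ d.keys) :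
    ∃ parts, pvAltLoop d l = some parts ∧
      ∀ s : String,
        l.foldl (fun s dz => s ++ PySem.Int.toStr (d.getD dz 0) ++ ",") s
          = s ++ PySem.Str.join "" parts := by
  induction l with
  | nil =>
    refine ⟨[], rfl, fun s => ?_⟩
    simp [PySem.Str.join, PySem.Chars.join, List.intercalate, String.append_empty]
  | cons dz rest ih =>
    have hmem : dz ∈ d.keys := h dz (List.mem_cons_self ..)
    obtain ⟨v, hv⟩ : ∃ v, d.get? dz = some v := by
      cases hg : d.get? dz with
      | none => exact absurd ((PySem.Dict.get?_eq_none_iff_not_mem_keys d dz).mp hg) (not_not_intro hmem)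
      | some v => exact ⟨v, rfl⟩
    obtain ⟨parts, hp, hfold⟩ := ih (fun e he => h e (List.mem_cons_of_mem _ he))
    refine ⟨(PySem.Int.toStr v ++ ",") :: parts, ?_, fun s => ?_⟩
    · simp [pvAltLoop, hv, hp]
    · rw [List.foldl_cons, PySem.Dict.getD_of_get?_eq_some d 0 hv, hfold, pv_join_cons]
      simp [String.append_assoc]

theorem pvAltLoop_none (d : PySem.Dict Int Int) (l : List Int)
    (h : ∃ e ∈ l, e ∉ d.keys) : pvAltLoop d l = none := by
  induction l with
  | nil => simp at h
  | cons dz rest ih =>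
    obtain ⟨e, he, hek⟩ := h
    rcases List.mem_cons.mp he with rfl | he'
    · have : d.get? e = none := (PySem.Dict.get?_eq_none_iff_not_mem_keys d e).mpr hek
      simp [pvAltLoop, this]
    · cases hg : d.get? dz with
      | none => simp [pvAltLoop, hg]
      | some v => simp [pvAltLoop, hg, ih ⟨e, he', hek⟩]

-- ===== VERDICT (by name: the statement is the Claim_ definition above) =====
theorem make_hstgrmstr_w_dzsordsor_dzsfreqdict_n_gentotal_spec : Claim_equal_make_hstgrmstr_w_dzsordsor_dzsfreqdict_n_gentotal := by
  intro dz_ord_sor hdict gentotal _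
  unfold Spec_make_hstgrmstr_w_dzsordsor_dzsfreqdict_n_gentotal
  unfold make_hstgrmstr_w_dzsordsor_dzsfreqdict_n_gentotal make_hstgrmstr_w_dzsordsor_dzsfreqdict_n_gentotal_alt
  set d := PySem.Dict.ofList hdict with hd
  have hsum : (dz_ord_sor.map (fun e => if e ∈ d.keys then (1 : Int) else 0)).sum
      = ((dz_ord_sor.countP (fun e => decide (e ∈ d.keys)) : Nat) : Int) := by
    have := PySem.List.sum_map_ite_one_zero (fun e => decide (e ∈ d.keys)) dz_ord_sor
    simpa using this
  by_cases hall : ∀ e ∈ dz_ord_sor, e ∈ d.keys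
  · have hcnt : dz_ord_sor.countP (fun e => decide (e ∈ d.keys)) = dz_ord_sor.length :=
      List.countP_eq_length.mpr (fun e he => decide_eq_true (hall e he))
    obtain ⟨parts, hp, hfold⟩ := pvAltLoop_some d dz_ord_sor hall
    simp [hsum, hcnt, hp, hfold "", String.empty_append]
  · have hcnt : dz_ord_sor.countP (fun e => decide (e ∈ d.keys)) ≠ dz_ord_sor.length := by
      intro hc
      exact hall (fun e he => of_decide_eq_true (List.countP_eq_length.mp hc e he))
    push Not at hall
    obtain ⟨e, he, hek⟩ := hall
    have hnone := pvAltLoop_none d dz_ord_sor ⟨e, he, hek⟩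
    have : (dz_ord_sor.map (fun e => if e ∈ d.keys then (1 : Int) else 0)).sum ≠ (dz_ord_sor.length : Int) := by
      rw [hsum]; exact_mod_cast hcnt
    simp only [hnone, if_pos this]
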